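-- pv_equiv track=rewrite | github.com/hsnamkoong/marginal-dro | utils.py | reroll_list
-- ===== SOURCE A (Python) =====
-- def reroll_list(unrolled_list, list_struct):
--     rolled_list = []
--     current_index = 0
--     for i in range(len(list_struct)):
--         num_to_pop = len(list_struct[i])
--         rolled_list.append(unrolled_list[current_index : (current_index + num_to_pop)])
--         current_index += num_to_pop
--     return rolled_list
-- ===== SOURCE B (Python) =====
-- def reroll_list(unrolled_list, list_struct):
--     rolled = []
--     rest = unrolled_list
--     for sub in list_struct:
--         n = len(sub)
--         rolled.append(rest[:n])
--         rest = rest[n:]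
--     return rolled
-- ===== Notes on version B (the rewrite author's own statement) =====
-- stated objective: simpler
-- what changed: B consumes a shrinking remainder list (take the next chunk off the front each step) instead of A's running integer index with range/indexing arithmetic into the original list.
import Mathlib
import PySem

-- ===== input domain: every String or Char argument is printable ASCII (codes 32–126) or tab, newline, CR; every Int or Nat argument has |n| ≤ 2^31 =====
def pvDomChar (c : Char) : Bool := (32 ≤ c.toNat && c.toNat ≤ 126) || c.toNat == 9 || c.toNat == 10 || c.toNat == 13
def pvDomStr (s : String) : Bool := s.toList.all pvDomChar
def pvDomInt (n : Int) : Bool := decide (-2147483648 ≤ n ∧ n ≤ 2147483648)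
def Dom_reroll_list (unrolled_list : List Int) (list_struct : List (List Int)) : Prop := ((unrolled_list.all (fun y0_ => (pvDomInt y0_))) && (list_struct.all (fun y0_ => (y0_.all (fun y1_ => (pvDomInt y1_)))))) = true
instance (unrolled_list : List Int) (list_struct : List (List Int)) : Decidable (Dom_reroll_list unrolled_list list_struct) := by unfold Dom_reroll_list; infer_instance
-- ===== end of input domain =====

-- B re-splits by consuming a shrinking remainder list instead of A's running index; simpler decomposition, same values.

-- ===== PORT A =====
-- for i in range(len(list_struct)): slice at a running integer index.
-- list_struct[i] ported with pyGetD (i is always in range here, so Python never raises).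
def reroll_list (unrolled_list : List Int) (list_struct : List (List Int)) : List (List Int) :=
  ((PySem.List.pyRange 0 list_struct.length 1).foldl
    (fun (st : List (List Int) × Int) i =>
      let num : Int := ((PySem.List.pyGetD list_struct i []).length : Int)
      (st.1 ++ [PySem.List.slice unrolled_list (some st.2) (some (st.2 + num))], st.2 + num))
    ([], 0)).1

-- ===== PORT B =====
-- for sub in list_struct: pop the next len(sub) elements off the remainder.
def reroll_list_alt (unrolled_list : List Int) (list_struct : List (List Int)) : List (List Int) :=
  (list_struct.foldl
    (fun (st : List (List Int) × List Int) sub =>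
      (st.1 ++ [st.2.take sub.length], st.2.drop sub.length))
    ([], unrolled_list)).1

-- ===== PRECONDITION & SPEC =====
def Spec_reroll_list (unrolled_list : List Int) (list_struct : List (List Int)) (out : List (List Int)) : Prop := out = reroll_list_alt unrolled_list list_struct
instance (unrolled_list : List Int) (list_struct : List (List Int)) (out : List (List Int)) : Decidable (Spec_reroll_list unrolled_list list_struct out) := by unfold Spec_reroll_list; infer_instance

-- ===== CLAIM (what is proved, stated in full; the proofs are below) =====
def Claim_equal_reroll_list : Prop := ∀ (unrolled_list : List Int) (list_struct : List (List Int)), Dom_reroll_list unrolled_list list_struct → Spec_reroll_list unrolled_list list_struct (reroll_list unrolled_list list_struct)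

-- ===== LEMMAS AND PROOFS =====

-- reference chunking both folds compute
def pvChunks : List Int → List (List Int) → List (List Int)
  | _, [] => []
  | u, s :: r => u.take s.length :: pvChunks (u.drop s.length) r

theorem pvB_fold (ls : List (List Int)) (u : List Int) (acc : List (List Int)) :
    (ls.foldl
      (fun (st : List (List Int) × List Int) sub =>
        (st.1 ++ [st.2.take sub.length], st.2.drop sub.length))
      (acc, u)).1 = acc ++ pvChunks u ls := by
  induction ls generalizing u acc with
  | nil => simp [pvChunks]
  | cons s r ih => simp [List.foldl, pvChunks, ih]

theorem pvA_fold (ls pre : List (List Int)) (u : List Int) (acc : List (List Int)) (c : Nat) :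
    (((PySem.List.pyRange pre.length (pre ++ ls).length 1).foldl
      (fun (st : List (List Int) × Int) i =>
        let num : Int := ((PySem.List.pyGetD (pre ++ ls) i []).length : Int)
        (st.1 ++ [PySem.List.slice u (some st.2) (some (st.2 + num))], st.2 + num))
      (acc, (c : Int))).1) = acc ++ pvChunks (u.drop c) ls := by
  induction ls generalizing pre acc c with
  | nil => simp [PySem.List.pyRange_one_eq_nil, pvChunks]
  | cons s r ih =>
    have hlt : (pre.length : Int) < ((pre ++ s :: r).length : Int) := by
      simp
    rw [PySem.List.pyRange_one_cons hlt]
    have hget : PySem.List.pyGetD (pre ++ s :: r) (pre.length : Int) [] = s := by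
      rw [PySem.List.pyGetD_natCast]
      simp [List.getD]
    simp only [List.foldl_cons, hget]
    have hlen : ((pre.length : Int) + 1) = ((pre ++ [s]).length : Int) := by simp
    have hfull : pre ++ s :: r = (pre ++ [s]) ++ r := by simp
    have hslice : PySem.List.slice u (some (c : Int)) (some ((c : Int) + (s.length : Int)))
        = (u.drop c).take s.length := PySem.List.slice_natCast_add u c s.length
    have hc : (c : Int) + (s.length : Int) = ((c + s.length : Nat) : Int) := by push_cast; ring
    rw [hslice, hc, hlen, hfull, ih ((pre ++ [s])) (acc ++ [(u.drop c).take s.length]) (c + s.length)]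
    simp [pvChunks, List.drop_drop]

-- ===== VERDICT (by name: the statement is the Claim_ definition above) =====
theorem reroll_list_spec : Claim_equal_reroll_list := by
  intro u ls _
  unfold Spec_reroll_list reroll_list reroll_list_alt
  have hA := pvA_fold ls [] u [] 0
  simp only [List.nil_append, List.length_nil, Nat.cast_zero, List.drop_zero] at hA
  rw [hA, pvB_fold ls u []]
  simp
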